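-- pv_equiv track=rewrite | github.com/commit-live-students/fractal_hackerrank_hiring_challenge_3 | q01_chocolates/build.py | q01_chocolates
-- ===== SOURCE A (Python) =====
-- input_list = [2, 5, 8, 11, 4]
--
-- def q01_chocolates(my_list=input_list):
--     '''Funtion to find the number of choclates'''
--
--     output = []   #empty list
--
--     #For loop
--     for i,v in enumerate(my_list):
--         if v%2 != 0:   #check is its odd only then choc count
--             if i == 0:  #if its first element then append same val
--                 output.append(v)
--             else:
--                 v = v + output[i-1]
--                 output.append(v)
--         elif v%2 == 0: #check is its even then value as last val
--             if i == 0: #if its first element then append 0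
--                 output.append(0)
--             else:
--                 v = output[i-1]
--                 output.append(v)
--     return output
-- ===== SOURCE B (Python) =====
-- input_list = [2, 5, 8, 11, 4]
--
-- def q01_chocolates(my_list=input_list):
--     '''Funtion to find the number of choclates'''
--     # Back-to-front: the last output is the total of all odd values; walking the
--     # list in reverse, record the current total, then subtract the element's odd
--     # contribution; reverse at the end.
--     remaining = sum(v for v in my_list if v % 2 != 0)
--     output = []
--     for v in reversed(my_list):
--         output.append(remaining)
--         if v % 2 != 0:
--             remaining -= v
--     output.reverse()
--     return output
-- ===== Notes on version B (the rewrite author's own statement) =====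
-- stated objective: alternative
-- what changed: Replaces A's forward scan with self-referential output[i-1] indexing by a back-to-front algorithm: compute the total odd sum once, then traverse the list in reverse, emitting the running total and subtracting each odd value, reversing the result at the end.
import Mathlib
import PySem

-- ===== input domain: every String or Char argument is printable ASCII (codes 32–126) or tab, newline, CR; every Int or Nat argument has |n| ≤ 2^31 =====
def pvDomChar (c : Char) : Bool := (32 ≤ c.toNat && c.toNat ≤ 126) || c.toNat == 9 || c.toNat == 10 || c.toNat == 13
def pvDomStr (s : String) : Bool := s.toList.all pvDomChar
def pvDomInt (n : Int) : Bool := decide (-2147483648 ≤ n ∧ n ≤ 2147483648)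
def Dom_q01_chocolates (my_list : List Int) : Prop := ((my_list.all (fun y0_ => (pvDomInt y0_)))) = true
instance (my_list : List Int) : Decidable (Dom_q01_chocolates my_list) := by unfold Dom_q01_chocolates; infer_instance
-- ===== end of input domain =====

-- B replaces A's forward scan (with output[i-1] self-indexing) by a back-to-front
-- algorithm: total odd sum first, then a reverse traversal that subtracts each odd
-- value, reversing the output at the end — alternative decomposition, same cost.


-- ===== PORT A =====
-- Literal port of A: fold over enumerate(my_list); output[i-1] is ported as
-- (pyGet? output (i-1)).getD 0 — for i ≥ 1 Python's index i-1 is always in range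
-- (output has i elements there), so the default is never used and the port is exact.
def q01_chocolates (my_list : List Int) : List Int :=
  (PySem.List.enumerate my_list).foldl (fun output iv =>
    let i := iv.1
    let v := iv.2
    if PySem.Int.mod v 2 ≠ 0 then
      if i == 0 then output ++ [v]
      else output ++ [v + (PySem.List.pyGet? output (i - 1)).getD 0]
    else if PySem.Int.mod v 2 == 0 then
      if i == 0 then output ++ [0]
      else output ++ [(PySem.List.pyGet? output (i - 1)).getD 0]
    else output) []

-- ===== PORT B =====
-- Port of Source B: sum of odd values, then a fold over the reversed list carrying
-- (output-so-far, remaining), with a final reverse.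
def q01_chocolates_alt (my_list : List Int) : List Int :=
  let remaining := (my_list.filter (fun v => PySem.Int.mod v 2 != 0)).sum
  let st := my_list.reverse.foldl (fun (st : List Int × Int) v =>
      (st.1 ++ [st.2], if PySem.Int.mod v 2 ≠ 0 then st.2 - v else st.2))
    ([], remaining)
  st.1.reverse

-- ===== PRECONDITION & SPEC =====
def Spec_q01_chocolates (my_list : List Int) (out : List Int) : Prop := out = q01_chocolates_alt my_list
instance (my_list : List Int) (out : List Int) : Decidable (Spec_q01_chocolates my_list out) := by unfold Spec_q01_chocolates; infer_instance

-- ===== CLAIM (what is proved, stated in full; the proofs are below) =====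
def Claim_equal_q01_chocolates : Prop := ∀ (my_list : List Int), Dom_q01_chocolates my_list → Spec_q01_chocolates my_list (q01_chocolates my_list)

-- ===== LEMMAS AND PROOFS =====

-- odd-or-zero contribution
def pvG (v : Int) : Int := if PySem.Int.mod v 2 ≠ 0 then v else 0

lemma pvG_eq (v : Int) : pvG v = if v % 2 = 1 then v else 0 := by
  unfold pvG
  rw [PySem.Int.mod_eq_emod_of_pos (a := v) (b := 2) (by omega)]
  rcases Int.emod_two_eq v with h | h <;> simp [h]

-- reference forward scan: running total of odd-or-zero values
def pvScan (tot : Int) : List Int → List Int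
  | [] => []
  | v :: r => (tot + pvG v) :: pvScan (tot + pvG v) r

-- reference backward emission: record rem, then subtract the odd contribution
def pvBack (rem : Int) : List Int → List Int
  | [] => []
  | v :: r => rem :: pvBack (rem - pvG v) r

lemma pvA_inv (xs : List Int) : ∀ (n : Nat) (out : List Int) (tot : Int),
    out.length = n → (n = 0 → tot = 0) →
    (0 < n → PySem.List.pyGet? out ((n : Int) - 1) = some tot) →
    (PySem.List.enumerate xs n).foldl (fun output iv =>
      let i := iv.1
      let v := iv.2
      if PySem.Int.mod v 2 ≠ 0 then
        if i == 0 then output ++ [v]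
        else output ++ [v + (PySem.List.pyGet? output (i - 1)).getD 0]
      else if PySem.Int.mod v 2 == 0 then
        if i == 0 then output ++ [0]
        else output ++ [(PySem.List.pyGet? output (i - 1)).getD 0]
      else output) out = out ++ pvScan tot xs := by
  induction xs with
  | nil => intro n out tot _ _ _; simp [PySem.List.enumerate, pvScan]
  | cons v r ih =>
    intro n out tot hlen h0 hget
    rw [PySem.List.enumerate_cons]
    simp only [List.foldl_cons]
    have hmodcase : PySem.Int.mod v 2 = 0 ∨ PySem.Int.mod v 2 = 1 := by
      have h1 := PySem.Int.mod_nonneg v (b := 2) (by omega)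
      have h2 := PySem.Int.mod_lt v (b := 2) (by omega)
      omega
    have hm2 : PySem.Int.mod v 2 = v % 2 :=
      PySem.Int.mod_eq_emod_of_pos (a := v) (b := 2) (by omega)
    have step : (if PySem.Int.mod v 2 ≠ 0 then
        if (n : Int) == 0 then out ++ [v]
        else out ++ [v + (PySem.List.pyGet? out ((n : Int) - 1)).getD 0]
      else if PySem.Int.mod v 2 == 0 then
        if (n : Int) == 0 then out ++ [0]
        else out ++ [(PySem.List.pyGet? out ((n : Int) - 1)).getD 0]
      else out) = out ++ [tot + pvG v] := by
      rcases Nat.eq_zero_or_pos n with hn | hn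
      · subst hn
        have ht := h0 rfl
        subst ht
        rcases hmodcase with hm | hm <;> rw [hm2] at hm <;>
          simp [pvG, hm2, hm] <;> omega
      · have hg := hget hn
        have hne : ((n : Int) == 0) = false := by simp; omega
        rcases hmodcase with hm | hm <;> rw [hm2] at hm <;>
          simp [pvG, hm2, hm, hne, hg] <;> omega
    rw [step]
    have hidx : ((n : Int) + 1) = ((n + 1 : Nat) : Int) := by push_cast; ring
    rw [hidx, ih (n + 1) (out ++ [tot + pvG v]) (tot + pvG v)
      (by simp [hlen]) (by omega)
      (by
        intro _
        have he : ((n + 1 : Nat) : Int) - 1 = (n : Int) := by push_cast; ring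
        rw [he]
        rw [show PySem.List.pyGet? (out ++ [tot + pvG v]) (n : Int)
              = (out ++ [tot + pvG v])[n]? from by
          simp [PySem.List.pyGet?, PySem.List.pyIdx?, hlen]]
        rw [List.getElem?_append_right (by omega)]
        simp [hlen])]
    simp [pvScan]

lemma pvB_inv (ys : List Int) : ∀ (out : List Int) (rem : Int),
    (ys.foldl (fun (st : List Int × Int) v =>
      (st.1 ++ [st.2], if PySem.Int.mod v 2 ≠ 0 then st.2 - v else st.2)) (out, rem)).1
      = out ++ pvBack rem ys := by
  induction ys with
  | nil => intro out rem; simp [pvBack]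
  | cons v r ih =>
    intro out rem
    simp only [List.foldl_cons]
    rw [ih]
    rcases Int.emod_two_eq v with h | h <;>
      simp [pvBack, pvG_eq, PySem.Int.mod_eq_emod_of_pos (a := v) (b := 2) (by omega), h]

lemma pvFilt (r : List Int) :
    r.filter (fun v => PySem.Int.mod v 2 != 0) = r.filter (fun v => v % 2 != 0) := by
  apply List.filter_congr
  intro v _
  rw [PySem.Int.mod_eq_emod_of_pos (a := v) (b := 2) (by omega)]

lemma pvSumG (xs : List Int) :
    (xs.filter (fun v => PySem.Int.mod v 2 != 0)).sum = (xs.map pvG).sum := by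
  rw [pvFilt]
  induction xs with
  | nil => rfl
  | cons v r ih =>
    rcases Int.emod_two_eq v with h | h <;> simp [List.filter_cons, pvG_eq, h, ih]

lemma pvBack_append (a b : List Int) : ∀ rem,
    pvBack rem (a ++ b) = pvBack rem a ++ pvBack (rem - (a.map pvG).sum) b := by
  induction a with
  | nil => intro rem; simp [pvBack]
  | cons v r ih =>
    intro rem
    simp only [List.cons_append, pvBack, ih, List.map_cons, List.sum_cons]
    congr 2
    ring_nf

lemma pvBack_reverse (xs : List Int) : ∀ tot,
    (pvBack (tot + (xs.map pvG).sum) xs.reverse).reverse = pvScan tot xs := by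
  induction xs with
  | nil => intro tot; simp [pvBack, pvScan]
  | cons v r ih =>
    intro tot
    rw [List.reverse_cons, pvBack_append]
    have hrs : (r.reverse.map pvG).sum = (r.map pvG).sum := by
      simp
    simp only [List.map_cons, List.sum_cons, hrs]
    have h1 : tot + (pvG v + (r.map pvG).sum) = (tot + pvG v) + (r.map pvG).sum := by ring
    have h2 : (tot + pvG v) + (r.map pvG).sum - (r.map pvG).sum = tot + pvG v := by ring
    rw [h1, h2]
    simp [pvBack, pvScan, ih (tot + pvG v)]

-- ===== VERDICT (by name: the statement is the Claim_ definition above) =====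
theorem q01_chocolates_spec : Claim_equal_q01_chocolates := by
  intro my_list _
  unfold Spec_q01_chocolates q01_chocolates q01_chocolates_alt
  have hA := pvA_inv my_list 0 [] 0 rfl (fun _ => rfl) (by omega)
  simp only [Nat.cast_zero] at hA
  rw [hA]
  show [] ++ pvScan 0 my_list =
    ((my_list.reverse.foldl (fun (st : List Int × Int) v =>
      (st.1 ++ [st.2], if PySem.Int.mod v 2 ≠ 0 then st.2 - v else st.2))
      ([], (my_list.filter (fun v => PySem.Int.mod v 2 != 0)).sum)).1).reverse
  rw [pvB_inv, pvSumG]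
  simp only [List.nil_append]
  have h := pvBack_reverse my_list 0
  rw [Int.zero_add] at h
  rw [h]
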